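-- pv_equiv track=rewrite | github.com/oddwatcher/AdderNet | approxadder_MNIST_RESNET/adder.py | add_mixed_precision
-- ===== SOURCE A (Python) =====
-- from typing import Optional, Dict
--
-- def add_mixed_precision(
--     a: int,
--     b: int,
--     n_bit=32,
--     n_approx_bit=8,
--     mode="logic",
--     table: Optional[Dict[tuple, tuple]] = None,
-- ) -> int:
--     result = 0
--     carry = 0
--     for i in range(n_bit):
--         a_bit = (a >> i) & 1
--         b_bit = (b >> i) & 1
--         if i < n_approx_bit:
--             if mode == "table" and table:
--                 s, carry = approx_full_adder_table(a_bit, b_bit, carry, table)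
--             else:
--                 s, carry = approx_full_adder_logic(a_bit, b_bit, carry)
--         else:
--             s = a_bit ^ b_bit ^ carry
--             carry = (a_bit & b_bit) | (b_bit & carry) | (a_bit & carry)
--         result |= s << i
--     return result
--
-- def approx_full_adder_logic(a_bit, b_bit, carry_in):
--     s = a_bit ^ b_bit ^ carry_in
--     carry_out = (a_bit & b_bit) | (b_bit & carry_in) | (a_bit & carry_in)
--     return s, carry_out
--
-- def approx_full_adder_table(a_bit, b_bit, carry_in, table):
--     key = (a_bit, b_bit, carry_in)
--     return table.get(key, (0, 0))  # 默认值
-- ===== SOURCE B (Python) =====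
-- from typing import Optional, Dict
--
-- def add_mixed_precision(
--     a: int,
--     b: int,
--     n_bit=32,
--     n_approx_bit=8,
--     mode="logic",
--     table: Optional[Dict[tuple, tuple]] = None,
-- ) -> int:
--     if n_bit <= 0:
--         return 0
--     if mode != "table" or not table:
--         # exact ripple-carry over all bits == plain addition modulo 2**n_bit
--         return (a + b) % (1 << n_bit)
--     k = min(max(n_approx_bit, 0), n_bit)
--     low = 0
--     carry = 0
--     for i in range(k):
--         s, carry = table.get(((a >> i) & 1, (b >> i) & 1, carry), (0, 0))
--         low += s << i
--     # the remaining exact bits in one arithmetic op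
--     return low + ((((a >> k) + (b >> k) + carry) % (1 << (n_bit - k))) << k)
-- ===== Notes on version B (the rewrite author's own statement) =====
-- stated objective: faster
-- what changed: B replaces A's bit-by-bit ripple-carry loop over all n_bit bits by a single modular addition (a+b) % 2**n_bit in logic mode, and in table mode loops only over the approximate low bits and computes the exact high bits with one shifted modular addition.
-- outside the precondition, e.g. on add_mixed_precision(0, 0, 2, 2, 'table', {(0, 0, 0): (3, 0)}): A returns 7, B returns 9; on add_mixed_precision(0, 0, 2, 1, 'table', {(0, 0, 0): (0, 2)}): A returns 4, B returns 0
import Mathlib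
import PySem

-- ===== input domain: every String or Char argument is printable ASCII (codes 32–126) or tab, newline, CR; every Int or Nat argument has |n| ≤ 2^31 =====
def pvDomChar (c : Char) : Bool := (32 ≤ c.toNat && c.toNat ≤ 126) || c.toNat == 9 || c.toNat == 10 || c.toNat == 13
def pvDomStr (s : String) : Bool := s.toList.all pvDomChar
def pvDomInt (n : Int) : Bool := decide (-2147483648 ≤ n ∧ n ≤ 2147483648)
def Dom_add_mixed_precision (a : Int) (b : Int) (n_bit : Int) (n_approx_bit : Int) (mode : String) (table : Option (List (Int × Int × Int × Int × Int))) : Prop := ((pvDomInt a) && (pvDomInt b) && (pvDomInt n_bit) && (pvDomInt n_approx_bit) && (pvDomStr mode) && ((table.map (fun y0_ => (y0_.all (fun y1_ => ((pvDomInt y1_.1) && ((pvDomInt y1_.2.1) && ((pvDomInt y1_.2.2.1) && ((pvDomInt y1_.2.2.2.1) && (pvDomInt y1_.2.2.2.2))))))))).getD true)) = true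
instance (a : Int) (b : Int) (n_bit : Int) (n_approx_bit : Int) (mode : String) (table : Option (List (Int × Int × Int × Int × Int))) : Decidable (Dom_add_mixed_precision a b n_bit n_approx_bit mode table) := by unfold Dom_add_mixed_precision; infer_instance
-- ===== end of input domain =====

-- ===== PORT A =====
-- B replaces A's full n_bit-iteration ripple-carry loop by a loop over only the approximate
-- low bits plus one modular addition for the exact high bits (O(n_approx_bit) vs O(n_bit)).

def approx_full_adder_logic (a_bit b_bit carry_in : Int) : Int × Int :=
  (PySem.Int.bxor (PySem.Int.bxor a_bit b_bit) carry_in,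
   PySem.Int.bor (PySem.Int.bor (PySem.Int.band a_bit b_bit) (PySem.Int.band b_bit carry_in))
     (PySem.Int.band a_bit carry_in))

-- table.get(key, (0, 0)) on the association list (first match = dict lookup)
def approx_full_adder_table (a_bit b_bit carry_in : Int)
    (table : List (Int × Int × Int × Int × Int)) : Int × Int :=
  match table.find? (fun e => e.1 == a_bit && e.2.1 == b_bit && e.2.2.1 == carry_in) with
  | some e => (e.2.2.2.1, e.2.2.2.2)
  | none => (0, 0)

def add_mixed_precision (a : Int) (b : Int) (n_bit : Int) (n_approx_bit : Int) (mode : String) (table : Option (List (Int × Int × Int × Int × Int))) : Int :=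
  (((PySem.List.pyRange 0 n_bit).foldl (fun (rc : Int × Int) (i : Int) =>
      let a_bit := PySem.Int.band (a >>> i.toNat) 1
      let b_bit := PySem.Int.band (b >>> i.toNat) 1
      let sc :=
        if i < n_approx_bit then
          if mode = "table" ∧ table.getD [] ≠ [] then
            approx_full_adder_table a_bit b_bit rc.2 (table.getD [])
          else
            approx_full_adder_logic a_bit b_bit rc.2
        else
          (PySem.Int.bxor (PySem.Int.bxor a_bit b_bit) rc.2,
           PySem.Int.bor (PySem.Int.bor (PySem.Int.band a_bit b_bit) (PySem.Int.band b_bit rc.2))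
             (PySem.Int.band a_bit rc.2))
      (PySem.Int.bor rc.1 (sc.1 <<< i.toNat), sc.2)) ((0 : Int), (0 : Int))).1)

-- ===== PORT B =====
def add_mixed_precision_alt (a : Int) (b : Int) (n_bit : Int) (n_approx_bit : Int) (mode : String) (table : Option (List (Int × Int × Int × Int × Int))) : Int :=
  if n_bit ≤ 0 then 0
  else if ¬ mode = "table" ∨ table.getD [] = [] then
    (a + b) % ((1 : Int) <<< n_bit.toNat)
  else
    let k := min (max n_approx_bit 0) n_bit
    let lc := (PySem.List.pyRange 0 k).foldl (fun (lc : Int × Int) (i : Int) =>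
      let sc : Int × Int :=
        match (table.getD []).find? (fun e =>
            e.1 == PySem.Int.band (a >>> i.toNat) 1 &&
            e.2.1 == PySem.Int.band (b >>> i.toNat) 1 && e.2.2.1 == lc.2) with
        | some e => (e.2.2.2.1, e.2.2.2.2)
        | none => ((0 : Int), (0 : Int))
      (lc.1 + (sc.1 <<< i.toNat), sc.2)) ((0 : Int), (0 : Int))
    lc.1 + ((((a >>> k.toNat) + (b >>> k.toNat) + lc.2) % ((1 : Int) <<< (n_bit - k).toNat)) <<< k.toNat)

-- ===== PRECONDITION & SPEC =====
-- Pre_ restricts approx-table entries (sum, carry) to bit values 0/1 — the natural domain of a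
-- full-adder truth table; for non-bit entries A's OR-accumulation of overlapping shifted values
-- and its non-bit carry propagation produce artefacts of the implementation.
def Pre_add_mixed_precision (a : Int) (b : Int) (n_bit : Int) (n_approx_bit : Int) (mode : String) (table : Option (List (Int × Int × Int × Int × Int))) : Prop :=
  mode = "table" → ∀ e ∈ table.getD [], (e.2.2.2.1 = 0 ∨ e.2.2.2.1 = 1) ∧ (e.2.2.2.2 = 0 ∨ e.2.2.2.2 = 1)
instance (a : Int) (b : Int) (n_bit : Int) (n_approx_bit : Int) (mode : String) (table : Option (List (Int × Int × Int × Int × Int))) : Decidable (Pre_add_mixed_precision a b n_bit n_approx_bit mode table) := by unfold Pre_add_mixed_precision; infer_instance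

def pvWitness_add_mixed_precision : Int × Int × Int × Int × String × (Option (List (Int × Int × Int × Int × Int))) :=
  (3, 5, 8, 4, "table", some [(0, 0, 0, 0, 0), (1, 0, 0, 1, 0), (0, 1, 0, 1, 0), (1, 1, 0, 0, 1)])

def Spec_add_mixed_precision (a : Int) (b : Int) (n_bit : Int) (n_approx_bit : Int) (mode : String) (table : Option (List (Int × Int × Int × Int × Int))) (out : Int) : Prop := out = add_mixed_precision_alt a b n_bit n_approx_bit mode table
instance (a : Int) (b : Int) (n_bit : Int) (n_approx_bit : Int) (mode : String) (table : Option (List (Int × Int × Int × Int × Int))) (out : Int) : Decidable (Spec_add_mixed_precision a b n_bit n_approx_bit mode table out) := by unfold Spec_add_mixed_precision; infer_instance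

-- ===== CLAIM (what is proved, stated in full; the proofs are below) =====
def Claim_equal_add_mixed_precision : Prop := ∀ (a : Int) (b : Int) (n_bit : Int) (n_approx_bit : Int) (mode : String) (table : Option (List (Int × Int × Int × Int × Int))), Dom_add_mixed_precision a b n_bit n_approx_bit mode table → Pre_add_mixed_precision a b n_bit n_approx_bit mode table → Spec_add_mixed_precision a b n_bit n_approx_bit mode table (add_mixed_precision a b n_bit n_approx_bit mode table)


-- canonical exact full-adder step (what A's loop body computes on exact bits)
def exactStep (a b : Int) (rc : Int × Int) (i : Int) : Int × Int :=
  let a_bit := PySem.Int.band (a >>> i.toNat) 1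
  let b_bit := PySem.Int.band (b >>> i.toNat) 1
  (PySem.Int.bor rc.1 ((PySem.Int.bxor (PySem.Int.bxor a_bit b_bit) rc.2) <<< i.toNat),
   PySem.Int.bor (PySem.Int.bor (PySem.Int.band a_bit b_bit) (PySem.Int.band b_bit rc.2))
     (PySem.Int.band a_bit rc.2))

lemma pyRange_eq_nil {a b : Int} (h : b ≤ a) : PySem.List.pyRange a b = [] := by
  simp [PySem.List.pyRange]; omega

lemma band1_eq_emod (x : Int) : PySem.Int.band x 1 = x % 2 := by
  rw [PySem.Int.band_one]
  simp [PySem.Int.mod, Int.fmod_eq_emod]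

lemma band1_bit (x : Int) : PySem.Int.band x 1 = 0 ∨ PySem.Int.band x 1 = 1 := by
  rw [band1_eq_emod]; omega

lemma shift_decomp (a : Int) (j : Nat) :
    a >>> j = 2 * (a >>> (j + 1)) + PySem.Int.band (a >>> j) 1 := by
  rw [band1_eq_emod, Int.shiftRight_eq_div_pow, Int.shiftRight_eq_div_pow]
  have h : ((2 ^ (j + 1) : Nat) : Int) = ((2 ^ j : Nat) : Int) * 2 := by push_cast; ring
  rw [h, ← Int.ediv_ediv_of_nonneg (show (0:Int) ≤ ((2 ^ j : Nat) : Int) by positivity)]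
  omega

lemma full_adder (p q c : Int) (hp : p = 0 ∨ p = 1) (hq : q = 0 ∨ q = 1) (hc : c = 0 ∨ c = 1) :
    (PySem.Int.bxor (PySem.Int.bxor p q) c = 0 ∨ PySem.Int.bxor (PySem.Int.bxor p q) c = 1) ∧
    (PySem.Int.bor (PySem.Int.bor (PySem.Int.band p q) (PySem.Int.band q c)) (PySem.Int.band p c) = 0 ∨
     PySem.Int.bor (PySem.Int.bor (PySem.Int.band p q) (PySem.Int.band q c)) (PySem.Int.band p c) = 1) ∧
    p + q + c = PySem.Int.bxor (PySem.Int.bxor p q) c +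
      2 * PySem.Int.bor (PySem.Int.bor (PySem.Int.band p q) (PySem.Int.band q c)) (PySem.Int.band p c) := by
  rcases hp with rfl | rfl <;> rcases hq with rfl | rfl <;> rcases hc with rfl | rfl <;> decide

lemma emod_two_mul (t s : Int) (m : Nat) (hs : s = 0 ∨ s = 1) :
    (2 * t + s) % 2 ^ (m + 1) = 2 * (t % 2 ^ m) + s := by
  have hM : (0 : Int) < 2 ^ m := by positivity
  have h1 : 2 * t + s = (2 * (t % 2 ^ m) + s) + 2 ^ (m + 1) * (t / 2 ^ m) := by
    have h0 : t = t % 2 ^ m + 2 ^ m * (t / 2 ^ m) := (Int.emod_add_ediv t (2 ^ m)).symm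
    linear_combination 2 * h0
  rw [h1, Int.add_mul_emod_self_left]
  have h2 := Int.emod_nonneg t (by positivity : (2:Int) ^ m ≠ 0)
  have h3 := Int.emod_lt_of_pos t hM
  rw [Int.emod_eq_of_lt (by omega) (by rw [pow_succ]; omega)]

lemma bor_pow_add (r s : Int) (j : Nat) (hr0 : 0 ≤ r) (hr : r < 2 ^ j) (hs : s = 0 ∨ s = 1) :
    PySem.Int.bor r (s <<< j) = r + s * 2 ^ j := by
  rcases hs with rfl | rfl
  · simp [Int.zero_shiftLeft]
  · have h1 : (1 : Int) <<< j = ((2 ^ j : Nat) : Int) := by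
      rw [Int.shiftLeft_eq]; push_cast; ring
    rw [h1, PySem.Int.bor_of_nonneg hr0 (by positivity)]
    have hc : ((2 ^ j : Nat) : Int) = 2 ^ j := by push_cast; ring
    have hlt : r.toNat < 2 ^ j := by omega
    have h2 : r.toNat ||| 2 ^ j = r.toNat + 2 ^ j := by
      have := Nat.two_pow_add_eq_or_of_lt hlt 1
      simp only [Nat.mul_one] at this
      rw [Nat.lor_comm] at this
      omega
    rw [Int.toNat_natCast, h2]
    push_cast
    omega

lemma exact_fold (a b : Int) (n : Nat) : ∀ (d j : Nat), j ≤ n → n - j = d →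
    ∀ (r c : Int), 0 ≤ r → r < 2 ^ j → (c = 0 ∨ c = 1) →
    ((PySem.List.pyRange (j : Int) (n : Int)).foldl (exactStep a b) (r, c)).1
      = r + ((a >>> j + b >>> j + c) % 2 ^ (n - j)) * 2 ^ j := by
  intro d
  induction d with
  | zero =>
    intro j hj hd r c hr0 hr hc
    have hjn : j = n := by omega
    subst hjn
    rw [pyRange_eq_nil le_rfl]
    simp
  | succ d ih =>
    intro j hj hd r c hr0 hr hc
    have hjn : j < n := by omega
    have hlt : (j : Int) < (n : Int) := by exact_mod_cast hjn
    rw [PySem.List.pyRange_one_cons hlt]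
    simp only [List.foldl_cons]
    have hp := band1_bit (a >>> j)
    have hq := band1_bit (b >>> j)
    obtain ⟨hs, hm, hsum⟩ := full_adder _ _ _ hp hq hc
    have hstep : exactStep a b (r, c) (j : Int) =
        (r + (PySem.Int.bxor (PySem.Int.bxor (PySem.Int.band (a >>> j) 1) (PySem.Int.band (b >>> j) 1)) c) * 2 ^ j,
         PySem.Int.bor (PySem.Int.bor (PySem.Int.band (PySem.Int.band (a >>> j) 1) (PySem.Int.band (b >>> j) 1)) (PySem.Int.band (PySem.Int.band (b >>> j) 1) c)) (PySem.Int.band (PySem.Int.band (a >>> j) 1) c)) := by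
      simp only [exactStep, Int.toNat_natCast]
      rw [bor_pow_add r _ j hr0 hr hs]
    rw [hstep]
    have hcast : ((j : Int) + 1) = ((j + 1 : Nat) : Int) := by push_cast; ring
    rw [hcast, ih (j + 1) (by omega) (by omega) _ _ (by rcases hs with h | h <;> rw [h] <;> nlinarith [pow_pos (show (0:Int) < 2 by norm_num) j]) (by rcases hs with h | h <;> rw [h] <;> rw [pow_succ] <;> nlinarith [pow_pos (show (0:Int) < 2 by norm_num) j]) hm]
    have hA := shift_decomp a j
    have hB := shift_decomp b j
    have hT : a >>> j + b >>> j + c =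
        2 * (a >>> (j + 1) + b >>> (j + 1) +
          PySem.Int.bor (PySem.Int.bor (PySem.Int.band (PySem.Int.band (a >>> j) 1) (PySem.Int.band (b >>> j) 1)) (PySem.Int.band (PySem.Int.band (b >>> j) 1) c)) (PySem.Int.band (PySem.Int.band (a >>> j) 1) c)) +
        PySem.Int.bxor (PySem.Int.bxor (PySem.Int.band (a >>> j) 1) (PySem.Int.band (b >>> j) 1)) c := by
      linarith [hA, hB, hsum]
    have hnj : n - j = (n - (j + 1)) + 1 := by omega
    rw [hT, hnj, emod_two_mul _ _ _ hs]
    ring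

def tableStepA (a b : Int) (t : List (Int × Int × Int × Int × Int)) (rc : Int × Int) (i : Int) : Int × Int :=
  let sc := approx_full_adder_table (PySem.Int.band (a >>> i.toNat) 1) (PySem.Int.band (b >>> i.toNat) 1) rc.2 t
  (PySem.Int.bor rc.1 (sc.1 <<< i.toNat), sc.2)

def altStep (a b : Int) (t : List (Int × Int × Int × Int × Int)) (lc : Int × Int) (i : Int) : Int × Int :=
  let sc := approx_full_adder_table (PySem.Int.band (a >>> i.toNat) 1) (PySem.Int.band (b >>> i.toNat) 1) lc.2 t
  (lc.1 + (sc.1 <<< i.toNat), sc.2)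

lemma table_lookup_bits (t : List (Int × Int × Int × Int × Int))
    (ht : ∀ e ∈ t, (e.2.2.2.1 = 0 ∨ e.2.2.2.1 = 1) ∧ (e.2.2.2.2 = 0 ∨ e.2.2.2.2 = 1))
    (p q c : Int) :
    ((approx_full_adder_table p q c t).1 = 0 ∨ (approx_full_adder_table p q c t).1 = 1) ∧
    ((approx_full_adder_table p q c t).2 = 0 ∨ (approx_full_adder_table p q c t).2 = 1) := by
  unfold approx_full_adder_table
  cases hf : t.find? (fun e => e.1 == p && e.2.1 == q && e.2.2.1 == c) with
  | none => simp
  | some e => simpa using ht e (List.mem_of_find?_eq_some hf)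

lemma table_fold (a b : Int) (t : List (Int × Int × Int × Int × Int))
    (ht : ∀ e ∈ t, (e.2.2.2.1 = 0 ∨ e.2.2.2.1 = 1) ∧ (e.2.2.2.2 = 0 ∨ e.2.2.2.2 = 1))
    (k : Nat) : ∀ (d j : Nat), j ≤ k → k - j = d →
    ∀ (r c : Int), 0 ≤ r → r < 2 ^ j → (c = 0 ∨ c = 1) →
    ((PySem.List.pyRange (j : Int) (k : Int)).foldl (tableStepA a b t) (r, c)
        = (PySem.List.pyRange (j : Int) (k : Int)).foldl (altStep a b t) (r, c)) ∧
    0 ≤ ((PySem.List.pyRange (j : Int) (k : Int)).foldl (tableStepA a b t) (r, c)).1 ∧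
    ((PySem.List.pyRange (j : Int) (k : Int)).foldl (tableStepA a b t) (r, c)).1 < 2 ^ k ∧
    (((PySem.List.pyRange (j : Int) (k : Int)).foldl (tableStepA a b t) (r, c)).2 = 0 ∨
     ((PySem.List.pyRange (j : Int) (k : Int)).foldl (tableStepA a b t) (r, c)).2 = 1) := by
  intro d
  induction d with
  | zero =>
    intro j hj hd r c hr0 hr hc
    have hjk : j = k := by omega
    subst hjk
    rw [pyRange_eq_nil le_rfl]
    exact ⟨rfl, hr0, hr, hc⟩
  | succ d ih =>
    intro j hj hd r c hr0 hr hc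
    have hlt : (j : Int) < (k : Int) := by exact_mod_cast (show j < k by omega)
    rw [PySem.List.pyRange_one_cons hlt]
    simp only [List.foldl_cons]
    obtain ⟨hs, hm⟩ := table_lookup_bits t ht (PySem.Int.band (a >>> j) 1) (PySem.Int.band (b >>> j) 1) c
    have hsh : (approx_full_adder_table (PySem.Int.band (a >>> j) 1) (PySem.Int.band (b >>> j) 1) c t).1 <<< j
        = (approx_full_adder_table (PySem.Int.band (a >>> j) 1) (PySem.Int.band (b >>> j) 1) c t).1 * 2 ^ j :=
      Int.shiftLeft_eq _ j
    have hstepA : tableStepA a b t (r, c) (j : Int) =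
        (r + (approx_full_adder_table (PySem.Int.band (a >>> j) 1) (PySem.Int.band (b >>> j) 1) c t).1 * 2 ^ j,
         (approx_full_adder_table (PySem.Int.band (a >>> j) 1) (PySem.Int.band (b >>> j) 1) c t).2) := by
      simp only [tableStepA, Int.toNat_natCast]
      rw [bor_pow_add r _ j hr0 hr hs]
    have hstepB : altStep a b t (r, c) (j : Int) =
        (r + (approx_full_adder_table (PySem.Int.band (a >>> j) 1) (PySem.Int.band (b >>> j) 1) c t).1 * 2 ^ j,
         (approx_full_adder_table (PySem.Int.band (a >>> j) 1) (PySem.Int.band (b >>> j) 1) c t).2) := by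
      simp only [altStep, Int.toNat_natCast, hsh]
    rw [hstepA, hstepB]
    have hcast : ((j : Int) + 1) = ((j + 1 : Nat) : Int) := by push_cast; ring
    rw [hcast]
    exact ih (j + 1) (by omega) (by omega) _ _
      (by rcases hs with h | h <;> rw [h] <;> nlinarith [pow_pos (show (0:Int) < 2 by norm_num) j])
      (by rcases hs with h | h <;> rw [h] <;> rw [pow_succ] <;> nlinarith [pow_pos (show (0:Int) < 2 by norm_num) j])
      hm

lemma one_shl (m : Nat) : (1 : Int) <<< m = 2 ^ m := by rw [Int.shiftLeft_eq]; ring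

theorem add_mixed_precision_spec : Claim_equal_add_mixed_precision := by
  intro a b n_bit n_approx_bit mode table hdom hpre
  unfold Spec_add_mixed_precision add_mixed_precision
  by_cases hn : n_bit ≤ 0
  · have hB0 : add_mixed_precision_alt a b n_bit n_approx_bit mode table = 0 := by
      unfold add_mixed_precision_alt; rw [if_pos hn]
    rw [hB0, pyRange_eq_nil hn]
    rfl
  · have hnb : n_bit = (n_bit.toNat : Int) := by omega
    set n := n_bit.toNat with hn_def
    by_cases hcond : mode = "table" ∧ table.getD [] ≠ []
    · -- table mode
      have hcondB : ¬ (¬ mode = "table" ∨ table.getD [] = []) := by tauto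
      set t := table.getD [] with ht_def
      set kI := min (max n_approx_bit 0) n_bit with hk_def
      have hk0 : 0 ≤ kI := by omega
      have hkn : kI ≤ n_bit := by omega
      have hkI : kI = (kI.toNat : Int) := by omega
      set k := kI.toNat with hkk
      have hkn' : k ≤ n := by omega
      have hB : add_mixed_precision_alt a b n_bit n_approx_bit mode table =
          ((PySem.List.pyRange 0 kI).foldl (altStep a b t) (0, 0)).1 +
            ((((a >>> kI.toNat) + (b >>> kI.toNat) +
                ((PySem.List.pyRange 0 kI).foldl (altStep a b t) (0, 0)).2) %
              ((1 : Int) <<< (n_bit - kI).toNat)) <<< kI.toNat) := by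
        unfold add_mixed_precision_alt
        rw [if_neg hn, if_neg hcondB]
        rfl
      rw [hB]
      have hbits := hpre hcond.1
      have hsplit : PySem.List.pyRange 0 n_bit = PySem.List.pyRange 0 kI ++ PySem.List.pyRange kI n_bit :=
        PySem.List.pyRange_one_append 0 kI n_bit hk0 hkn
      rw [hsplit, List.foldl_append]
      -- first segment of A: the loop body is the table step
      have hc1 : ∀ (acc : Int × Int), ∀ x ∈ PySem.List.pyRange 0 kI,
          (fun (rc : Int × Int) (i : Int) =>
            let a_bit := PySem.Int.band (a >>> i.toNat) 1
            let b_bit := PySem.Int.band (b >>> i.toNat) 1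
            let sc :=
              if i < n_approx_bit then
                if mode = "table" ∧ table.getD [] ≠ [] then
                  approx_full_adder_table a_bit b_bit rc.2 (table.getD [])
                else
                  approx_full_adder_logic a_bit b_bit rc.2
              else
                (PySem.Int.bxor (PySem.Int.bxor a_bit b_bit) rc.2,
                 PySem.Int.bor (PySem.Int.bor (PySem.Int.band a_bit b_bit) (PySem.Int.band b_bit rc.2))
                   (PySem.Int.band a_bit rc.2))
            (PySem.Int.bor rc.1 (sc.1 <<< i.toNat), sc.2)) acc x = tableStepA a b t acc x := by
        intro acc x hx
        rw [PySem.List.mem_pyRange_one] at hx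
        have hxa : x < n_approx_bit := by omega
        simp only [tableStepA, if_pos hxa, if_pos hcond, ← ht_def]
      rw [PySem.List.foldl_congr_mem _ _ (tableStepA a b t) _ hc1]
      -- second segment of A: the loop body is the exact step
      have hc2 : ∀ (acc : Int × Int), ∀ x ∈ PySem.List.pyRange kI n_bit,
          (fun (rc : Int × Int) (i : Int) =>
            let a_bit := PySem.Int.band (a >>> i.toNat) 1
            let b_bit := PySem.Int.band (b >>> i.toNat) 1
            let sc :=
              if i < n_approx_bit then
                if mode = "table" ∧ table.getD [] ≠ [] then
                  approx_full_adder_table a_bit b_bit rc.2 (table.getD [])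
                else
                  approx_full_adder_logic a_bit b_bit rc.2
              else
                (PySem.Int.bxor (PySem.Int.bxor a_bit b_bit) rc.2,
                 PySem.Int.bor (PySem.Int.bor (PySem.Int.band a_bit b_bit) (PySem.Int.band b_bit rc.2))
                   (PySem.Int.band a_bit rc.2))
            (PySem.Int.bor rc.1 (sc.1 <<< i.toNat), sc.2)) acc x = exactStep a b acc x := by
        intro acc x hx
        rw [PySem.List.mem_pyRange_one] at hx
        have hxa : ¬ x < n_approx_bit := by omega
        simp only [exactStep, if_neg hxa]
      rw [PySem.List.foldl_congr_mem _ _ (exactStep a b) _ hc2]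
      -- joint invariant on the first segment
      have h0k : PySem.List.pyRange 0 kI = PySem.List.pyRange ((0 : Nat) : Int) ((k : Nat) : Int) := by
        rw [Nat.cast_zero, ← hkI]
      rw [h0k]
      obtain ⟨heq, hS0, hSk, hSc⟩ := table_fold a b t hbits k k 0 (by omega) (by omega) 0 0 le_rfl (by norm_num) (Or.inl rfl)
      rw [← heq]
      set S := (PySem.List.pyRange ((0 : Nat) : Int) ((k : Nat) : Int)).foldl (tableStepA a b t) (0, 0) with hS_def
      -- exact tail of A in closed form
      have hkn2 : PySem.List.pyRange kI n_bit = PySem.List.pyRange ((k : Nat) : Int) ((n : Nat) : Int) := by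
        rw [← hkI, ← hnb]
      rw [hkn2]
      have hef := exact_fold a b n (n - k) k (by omega) rfl S.1 S.2 hS0 hSk hSc
      rw [← Prod.mk.eta (p := S)] at hef
      rw [hef]
      have hnk : (n_bit - kI).toNat = n - k := by omega
      rw [hnk, one_shl, Int.shiftLeft_eq]
    · -- logic mode
      have hcondB : (¬ mode = "table" ∨ table.getD [] = []) := by tauto
      have hB : add_mixed_precision_alt a b n_bit n_approx_bit mode table =
          (a + b) % ((1 : Int) <<< n_bit.toNat) := by
        unfold add_mixed_precision_alt
        rw [if_neg hn, if_pos hcondB]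
      rw [hB]
      have hc1 : ∀ (acc : Int × Int), ∀ x ∈ PySem.List.pyRange 0 n_bit,
          (fun (rc : Int × Int) (i : Int) =>
            let a_bit := PySem.Int.band (a >>> i.toNat) 1
            let b_bit := PySem.Int.band (b >>> i.toNat) 1
            let sc :=
              if i < n_approx_bit then
                if mode = "table" ∧ table.getD [] ≠ [] then
                  approx_full_adder_table a_bit b_bit rc.2 (table.getD [])
                else
                  approx_full_adder_logic a_bit b_bit rc.2
              else
                (PySem.Int.bxor (PySem.Int.bxor a_bit b_bit) rc.2,
                 PySem.Int.bor (PySem.Int.bor (PySem.Int.band a_bit b_bit) (PySem.Int.band b_bit rc.2))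
                   (PySem.Int.band a_bit rc.2))
            (PySem.Int.bor rc.1 (sc.1 <<< i.toNat), sc.2)) acc x = exactStep a b acc x := by
        intro acc x hx
        simp only [exactStep, approx_full_adder_logic, if_neg hcond]
        split <;> rfl
      rw [PySem.List.foldl_congr_mem _ _ (exactStep a b) _ hc1]
      have h0n : PySem.List.pyRange 0 n_bit = PySem.List.pyRange ((0 : Nat) : Int) ((n : Nat) : Int) := by
        rw [Nat.cast_zero, ← hnb]
      rw [h0n]
      have hef := exact_fold a b n n 0 (by omega) (by omega) 0 0 le_rfl (by norm_num) (Or.inl rfl)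
      rw [hef, one_shl]
      simp only [Int.shiftRight_zero, Nat.sub_zero, pow_zero, mul_one, zero_add, add_zero]
      rfl
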